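-- pv_equiv track=rewrite | github.com/sk8erry/python-practice | problems/dayscount.py | daysInBirthYear
-- ===== SOURCE A (Python) =====
-- daysInMonth = [31,28,31,30,31,30,31,31,30,31,30,31]
--
-- def isLeapYear(year):
--     if year % 4 == 0:
--         return 1
--     else:
--         return 0
--
-- def daysInBirthYear(birthYear,birthMonth,birthDay):
--     daysIBY = 0 #daysIBY = days in birth year before birth!
--     for i in range (0, birthMonth-1):
--         daysIBY = daysInMonth[i] + daysIBY
--     daysIBY = daysIBY + birthDay
--     if (birthMonth > 2) & (isLeapYear(birthYear) == 1):
--         daysIBY += 1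
--         print ('wow leap year')
--     else: pass
--     return (365 - daysIBY + isLeapYear(birthYear))
-- ===== SOURCE B (Python) =====
-- # B: cumulative month-offset table + single lookup instead of the per-month accumulation loop.
-- OFFSETS = [0, 31, 59, 90, 120, 151, 181, 212, 243, 273, 304, 334, 365]
--
-- def daysInBirthYear(birthYear, birthMonth, birthDay):
--     leap = 1 if birthYear % 4 == 0 else 0
--     before = OFFSETS[birthMonth - 1] if birthMonth > 1 else 0
--     before += birthDay
--     if birthMonth > 2 and leap == 1:
--         before += 1
--         print('wow leap year')
--     return 365 - before + leap
-- ===== Notes on version B (the rewrite author's own statement) =====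
-- stated objective: simpler
-- what changed: Replaces the per-month accumulation loop with a precomputed cumulative month-offset table and a single indexed lookup (guarded to 0 for months <= 1).
import Mathlib
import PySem

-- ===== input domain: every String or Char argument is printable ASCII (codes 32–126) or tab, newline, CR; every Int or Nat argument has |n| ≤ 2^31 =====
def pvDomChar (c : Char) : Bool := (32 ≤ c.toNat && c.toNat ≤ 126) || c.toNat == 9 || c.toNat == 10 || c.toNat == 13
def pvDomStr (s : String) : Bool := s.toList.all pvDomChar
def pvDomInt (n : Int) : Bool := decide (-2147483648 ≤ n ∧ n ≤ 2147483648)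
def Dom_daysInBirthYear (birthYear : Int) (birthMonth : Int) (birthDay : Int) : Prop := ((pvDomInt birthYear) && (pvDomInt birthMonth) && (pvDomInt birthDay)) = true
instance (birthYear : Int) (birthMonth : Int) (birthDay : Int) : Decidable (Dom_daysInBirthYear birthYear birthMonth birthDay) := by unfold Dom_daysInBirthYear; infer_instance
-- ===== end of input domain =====

-- B replaces A's month-accumulation loop by a precomputed cumulative-offset table and one lookup
-- (objective: simpler). Equivalence is about the RETURN value only: A's print('wow leap year')
-- side effect is not modelled.

-- ===== PORT A =====
def daysInMonthA : List Int := [31,28,31,30,31,30,31,31,30,31,30,31]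

def isLeapYearA (year : Int) : Int := if PySem.Int.mod year 4 = 0 then 1 else 0

def daysInBirthYear (birthYear : Int) (birthMonth : Int) (birthDay : Int) : Int :=
  let daysIBY : Int :=
    (PySem.List.pyRange 0 (birthMonth - 1) 1).foldl
      (fun acc i => PySem.List.pyGetD daysInMonthA i 0 + acc) 0
  let daysIBY := daysIBY + birthDay
  let daysIBY := if 2 < birthMonth ∧ isLeapYearA birthYear = 1 then daysIBY + 1 else daysIBY
  365 - daysIBY + isLeapYearA birthYear

-- ===== PORT B =====
def offsetsB : List Int := [0, 31, 59, 90, 120, 151, 181, 212, 243, 273, 304, 334, 365]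

def daysInBirthYear_alt (birthYear : Int) (birthMonth : Int) (birthDay : Int) : Int :=
  let leap : Int := if PySem.Int.mod birthYear 4 = 0 then 1 else 0
  let before : Int := if 1 < birthMonth then PySem.List.pyGetD offsetsB (birthMonth - 1) 0 else 0
  let before := before + birthDay
  let before := if 2 < birthMonth ∧ leap = 1 then before + 1 else before
  365 - before + leap

-- ===== PRECONDITION & SPEC =====
-- Pre_ excludes birthMonth ≥ 14, on which both A's loop and B's table lookup raise IndexError.
def Pre_daysInBirthYear (birthYear : Int) (birthMonth : Int) (birthDay : Int) : Prop := birthMonth ≤ 13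
instance (birthYear : Int) (birthMonth : Int) (birthDay : Int) : Decidable (Pre_daysInBirthYear birthYear birthMonth birthDay) := by unfold Pre_daysInBirthYear; infer_instance

def pvWitness_daysInBirthYear : Int × Int × Int := (2000, 5, 17)

def Spec_daysInBirthYear (birthYear : Int) (birthMonth : Int) (birthDay : Int) (out : Int) : Prop := out = daysInBirthYear_alt birthYear birthMonth birthDay
instance (birthYear : Int) (birthMonth : Int) (birthDay : Int) (out : Int) : Decidable (Spec_daysInBirthYear birthYear birthMonth birthDay out) := by unfold Spec_daysInBirthYear; infer_instance

-- ===== CLAIM (what is proved, stated in full; the proofs are below) =====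
def Claim_equal_daysInBirthYear : Prop := ∀ (birthYear : Int) (birthMonth : Int) (birthDay : Int), Dom_daysInBirthYear birthYear birthMonth birthDay → Pre_daysInBirthYear birthYear birthMonth birthDay → Spec_daysInBirthYear birthYear birthMonth birthDay (daysInBirthYear birthYear birthMonth birthDay)

-- ===== LEMMAS AND PROOFS =====

-- A's loop sum equals B's table entry, for every in-range month past January.
lemma loop_eq_table (m : Int) (h1 : 2 ≤ m) (h2 : m ≤ 13) :
    (PySem.List.pyRange 0 (m - 1) 1).foldl
      (fun acc i => PySem.List.pyGetD daysInMonthA i 0 + acc) 0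
      = PySem.List.pyGetD offsetsB (m - 1) 0 := by
  interval_cases m <;> decide

-- ===== VERDICT (by name: the statement is the Claim_ definition above) =====
theorem daysInBirthYear_spec : Claim_equal_daysInBirthYear := by
  intro y m d _ hpre
  unfold Spec_daysInBirthYear daysInBirthYear daysInBirthYear_alt isLeapYearA
  by_cases h : m ≤ 1
  · rw [PySem.List.pyRange_one_eq_nil (by omega)]
    simp [show ¬ (1 < m) by omega, show ¬ (2 < m) by omega]
  · rw [loop_eq_table m (by omega) hpre]
    simp [show 1 < m by omega]
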